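-- pv_equiv track=rewrite | github.com/breakthatbass/advent_of_code | 2025/day02/a.py | part1
-- ===== SOURCE A (Python) =====
-- def part1(start, end):
--     invalids = 0
--     for id in range(start, (end + 1)):
--         id_str = str(id)
--         half = int(len(id_str) / 2)
--         # Break in half and grab each side
--         side1 = id_str[:half]
--         side2 = id_str[half:]
--         # If each side is equal, it's a repeated sequence
--         if side1 == side2:
--             invalids += id
--     return invalids
-- ===== SOURCE B (Python) =====
-- def part1(start, end):
--     # Sum ids in [start, end] whose decimal digits form two identical halves.
--     # Every such id is s * (10**k + 1) with s having exactly k digits, so sum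
--     # the valid s per half-length k with an arithmetic series (no per-id scan).
--     total = 0
--     k = 1
--     while 10 ** (k - 1) * (10 ** k + 1) <= end:
--         m = 10 ** k + 1
--         lo = max(10 ** (k - 1), -((-start) // m))
--         hi = min(10 ** k - 1, end // m)
--         if lo <= hi:
--             total += m * (lo + hi) * (hi - lo + 1) // 2
--         k += 1
--     return total
-- ===== Notes on version B (the rewrite author's own statement) =====
-- stated objective: faster
-- what changed: Instead of scanning every id in [start, end] and string-splitting it, B enumerates half-lengths k and sums the valid ids s*(10^k+1) per k with an arithmetic series in closed form.
import Mathlib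
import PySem

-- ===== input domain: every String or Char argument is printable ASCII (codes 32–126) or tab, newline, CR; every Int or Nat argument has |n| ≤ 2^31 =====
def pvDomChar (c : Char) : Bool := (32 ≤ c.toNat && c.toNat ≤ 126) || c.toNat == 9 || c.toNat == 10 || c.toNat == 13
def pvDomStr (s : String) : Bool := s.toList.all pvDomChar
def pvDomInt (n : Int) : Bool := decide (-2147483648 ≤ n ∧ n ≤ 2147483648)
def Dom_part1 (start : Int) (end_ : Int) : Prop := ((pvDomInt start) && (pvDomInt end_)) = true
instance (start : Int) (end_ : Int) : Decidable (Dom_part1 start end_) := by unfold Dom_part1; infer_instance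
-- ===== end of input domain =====

-- B replaces A's per-id scan of [start, end] with a closed-form sum over half-lengths k
-- (ids s*(10^k+1), arithmetic series per k): measurably faster on large ranges.

-- ===== PORT A =====
def part1 (start : Int) (end_ : Int) : Int :=
  (PySem.List.pyRange start (end_ + 1)).foldl
    (fun invalids id =>
      let idStr := PySem.Int.toChars id
      let half : Int := PySem.Int.truncdiv ((idStr.length : Int)) 2
      let side1 := PySem.List.slice idStr none (some half)
      let side2 := PySem.List.slice idStr (some half) none
      if side1 = side2 then invalids + id else invalids) 0


-- ===== PORT B =====
-- B-side helper: the while-loop of Source B as recursion on the half-length k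
def part1AltLoop (start : Int) (end_ : Int) (k : Nat) : Int :=
  if _h : (10 : Int) ^ (k - 1) * (10 ^ k + 1) ≤ end_ then
    let m : Int := 10 ^ k + 1
    let lo : Int := max ((10 : Int) ^ (k - 1)) (-(PySem.Int.floordiv (-start) m))
    let hi : Int := min ((10 : Int) ^ k - 1) (PySem.Int.floordiv end_ m)
    (if lo ≤ hi then PySem.Int.floordiv (m * (lo + hi) * (hi - lo + 1)) 2 else 0) +
      part1AltLoop start end_ (k + 1)
  else 0
termination_by (end_ + 1 - 10 ^ (k - 1 : Nat) + if k = 0 then 1 else 0 : Int).toNat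
decreasing_by
  have h1 : (1 : Int) ≤ 10 ^ (k - 1) := one_le_pow₀ (by norm_num)
  have h2 : (1 : Int) ≤ 10 ^ k := one_le_pow₀ (by norm_num)
  have h3 : (10 : Int) ^ (k - 1) ≤ end_ := by nlinarith
  simp only [Nat.add_sub_cancel]
  by_cases hk : k = 0
  · subst hk; norm_num at h3 ⊢; omega
  · have h5 : (10 : Int) ^ (k - 1) < 10 ^ k :=
      pow_lt_pow_right₀ (by norm_num) (by omega)
    simp only [if_neg hk]
    norm_num
    omega

def part1_alt (start : Int) (end_ : Int) : Int := part1AltLoop start end_ 1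


-- ===== PRECONDITION & SPEC =====
def Spec_part1 (start : Int) (end_ : Int) (out : Int) : Prop := out = part1_alt start end_
instance (start : Int) (end_ : Int) (out : Int) : Decidable (Spec_part1 start end_ out) := by unfold Spec_part1; infer_instance

-- ===== CLAIM (what is proved, stated in full; the proofs are below) =====
def Claim_equal_part1 : Prop := ∀ (start : Int) (end_ : Int), Dom_part1 start end_ → Spec_part1 start end_ (part1 start end_)

-- ===== LEMMAS AND PROOFS =====

def dstr (n : Nat) : List Char :=
  if n < 10 then [Nat.digitChar n]
  else dstr (n / 10) ++ [Nat.digitChar (n % 10)]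
termination_by n
decreasing_by exact Nat.div_lt_self (by omega) (by omega)

def pad : Nat → Nat → List Char
  | 0, _ => []
  | (k+1), r => pad k (r / 10) ++ [Nat.digitChar (r % 10)]

theorem toDigitsCore_eq_dstr : ∀ (f n : Nat) (ds : List Char), n < f →
    Nat.toDigitsCore 10 f n ds = dstr n ++ ds := by
  intro f
  induction f with
  | zero => omega
  | succ f ih =>
    intro n ds hn
    rw [Nat.toDigitsCore]
    by_cases h : n / 10 = 0
    · have h10 : n < 10 := by omega
      have : n % 10 = n := Nat.mod_eq_of_lt h10
      simp [h, this, dstr, h10]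
    · have h10 : ¬ n < 10 := by omega
      rw [if_neg h, ih _ _ (by omega)]
      conv_rhs => rw [dstr, if_neg h10]
      simp

theorem toChars_nonneg (n : Int) (h : 0 ≤ n) : PySem.Int.toChars n = dstr n.toNat := by
  rw [PySem.Int.toChars, if_neg (by omega), Nat.toDigits,
    toDigitsCore_eq_dstr _ _ _ (by omega), List.append_nil]

theorem pad_length (k r : Nat) : (pad k r).length = k := by
  induction k generalizing r with
  | zero => rfl
  | succ k ih => simp [pad, ih]

theorem digitChar_inj {d e : Nat} (hd : d < 10) (he : e < 10)
    (h : Nat.digitChar d = Nat.digitChar e) : d = e := by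
  interval_cases d <;> interval_cases e <;> revert h <;> decide

theorem pad_inj {k r r' : Nat} (hr : r < 10 ^ k) (hr' : r' < 10 ^ k)
    (h : pad k r = pad k r') : r = r' := by
  induction k generalizing r r' with
  | zero => omega
  | succ k ih =>
    simp only [pad] at h
    have h2 := List.append_inj h (by simp [pad_length])
    simp at h2
    obtain ⟨h3, h4⟩ := h2
    have hd := digitChar_inj (Nat.mod_lt _ (by omega)) (Nat.mod_lt _ (by omega)) h4
    have := ih (r := r / 10) (r' := r' / 10)
      (by rw [pow_succ] at hr; omega) (by rw [pow_succ] at hr'; omega) h3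
    omega

theorem dstr_len (k n : Nat) (h1 : 10 ^ k ≤ n) (h2 : n < 10 ^ (k+1)) :
    (dstr n).length = k + 1 := by
  induction k generalizing n with
  | zero => rw [dstr, if_pos (by simpa using h2)]; rfl
  | succ k ih =>
    have h10 : ¬ n < 10 := by
      have : 10 ^ 1 ≤ 10 ^ (k+1) := Nat.pow_le_pow_right (by omega) (by omega)
      simp at this; omega
    rw [dstr, if_neg h10]
    have := ih (n / 10) (by rw [pow_succ] at h1; omega)
      (by rw [pow_succ] at h2; omega)
    simp [this]

theorem dstr_decomp (k q r : Nat) (hq : 1 ≤ q) (hr : r < 10 ^ k) :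
    dstr (q * 10 ^ k + r) = dstr q ++ pad k r := by
  induction k generalizing r with
  | zero => simp at hr; simp [hr, pad]
  | succ k ih =>
    have hbig : ¬ (q * 10 ^ (k+1) + r < 10) := by
      have : 10 ^ (k+1) ≥ 10 := by
        have := Nat.pow_le_pow_right (show 1 ≤ 10 by omega) (show 1 ≤ k+1 by omega)
        simpa using this
      nlinarith
    rw [dstr, if_neg hbig, pad]
    have hdiv : (q * 10 ^ (k+1) + r) / 10 = q * 10 ^ k + r / 10 := by
      rw [pow_succ, ← mul_assoc]; set a := q * 10 ^ k; omega
    have hmod : (q * 10 ^ (k+1) + r) % 10 = r % 10 := by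
      rw [pow_succ, ← mul_assoc]; set a := q * 10 ^ k; omega
    rw [hdiv, hmod, ih (r / 10) (by rw [pow_succ] at hr; omega)]
    simp

theorem dstr_eq_pad (k q : Nat) (hk : 1 ≤ k) (h1 : 10 ^ (k-1) ≤ q) (h2 : q < 10 ^ k) :
    dstr q = pad k q := by
  induction k generalizing q with
  | zero => omega
  | succ k ih =>
    by_cases hk0 : k = 0
    · subst hk0
      simp at h2
      rw [dstr, if_pos h2, pad, pad]
      simp [Nat.mod_eq_of_lt h2]
    · have h1' : 10 ^ k ≤ q := by simpa using h1
      have hpow : 10 ^ (k - 1) * 10 = 10 ^ k := by rw [← pow_succ]; congr 1; omega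
      have h10 : ¬ q < 10 := by
        have : 10 ^ 1 ≤ 10 ^ k := Nat.pow_le_pow_right (by omega) (by omega)
        simp at this; omega
      rw [dstr, if_neg h10, pad]
      have := ih (q := q / 10) (by omega)
        (by rw [Nat.le_div_iff_mul_le (by omega), hpow]; exact h1')
        (by rw [pow_succ] at h2; omega)
      rw [this]

theorem dstr_digits {n : Nat} {c : Char} (hc : c ∈ dstr n) :
    ∃ d, d < 10 ∧ c = Nat.digitChar d := by
  induction n using dstr.induct with
  | case1 n h => rw [dstr, if_pos h] at hc; simp at hc; exact ⟨n, h, hc⟩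
  | case2 n h ih =>
    rw [dstr, if_neg h] at hc
    simp at hc
    rcases hc with hc | hc
    · exact ih hc
    · exact ⟨n % 10, Nat.mod_lt _ (by omega), hc⟩

def Pk (k : Nat) (e : Int) : Prop :=
  1 ≤ k ∧ ∃ s : Int, 10 ^ (k - 1) ≤ s ∧ s ≤ 10 ^ k - 1 ∧ e = s * (10 ^ k + 1)

theorem trunc2 (L : Nat) : PySem.Int.truncdiv (L : Int) 2 = ((L / 2 : Nat) : Int) := by
  simp [PySem.Int.truncdiv]

theorem dstr_length_pos (n : Nat) : 1 ≤ (dstr n).length := by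
  rw [dstr]; split <;> simp

theorem double_bounds (k st : Nat) (hk : 1 ≤ k) (h1 : 10 ^ (k-1) ≤ st) (h2 : st ≤ 10 ^ k - 1) :
    10 ^ (2*k - 1) ≤ st * (10 ^ k + 1) ∧ st * (10 ^ k + 1) < 10 ^ (2*k) := by
  have e1 : 10 ^ (k-1) * 10 ^ k = 10 ^ (2*k - 1) := by rw [← pow_add]; congr 1; omega
  have e2 : 10 ^ k * 10 ^ k = 10 ^ (2*k) := by rw [← pow_add]; congr 1; omega
  have hp : 1 ≤ 10 ^ k := Nat.one_le_pow _ _ (by omega)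
  have hp2 : 1 ≤ 10 ^ (2*k) := Nat.one_le_pow _ _ (by omega)
  constructor
  · calc 10 ^ (2*k-1) ≤ 10 ^ (k-1) * (10 ^ k + 1) := by rw [mul_add, e1]; omega
    _ ≤ st * (10 ^ k + 1) := Nat.mul_le_mul_right _ h1
  · calc st * (10 ^ k + 1) ≤ (10 ^ k - 1) * (10 ^ k + 1) := Nat.mul_le_mul_right _ h2
    _ < 10 ^ (2*k) := by rw [Nat.sub_one_mul, mul_add, e2]; omega

theorem len_of_double (k st : Nat) (hk : 1 ≤ k) (h1 : 10 ^ (k-1) ≤ st) (h2 : st ≤ 10 ^ k - 1) :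
    (dstr (st * (10 ^ k + 1))).length = 2 * k := by
  obtain ⟨b1, b2⟩ := double_bounds k st hk h1 h2
  have he : 2*k - 1 + 1 = 2*k := by omega
  have := dstr_len (2*k - 1) _ b1 (by rw [he]; exact b2)
  rw [he] at this
  exact this

theorem toNat_bounds {s : Int} {k : Nat} (hs1 : (10:Int) ^ (k-1) ≤ s) (hs2 : s ≤ (10:Int) ^ k - 1) :
    10 ^ (k-1) ≤ s.toNat ∧ s.toNat ≤ 10 ^ k - 1 ∧ (s.toNat : Int) = s := by
  have hs0 : (0:Int) < s := lt_of_lt_of_le (by positivity) hs1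
  have hsc : (s.toNat : Int) = s := Int.toNat_of_nonneg (le_of_lt hs0)
  refine ⟨?_, ?_, hsc⟩
  · rw [← hsc] at hs1; exact_mod_cast hs1
  · have h1 : 1 ≤ 10 ^ k := Nat.one_le_pow _ _ (by omega)
    have : s ≤ ((10 ^ k - 1 : Nat) : Int) := by
      rw [Nat.cast_sub h1]; push_cast; exact hs2
    exact Int.toNat_le.mpr this

theorem valid_iff (e : Int) :
    (PySem.List.slice (PySem.Int.toChars e) none
        (some (PySem.Int.truncdiv (((PySem.Int.toChars e).length : Int)) 2)) =
      PySem.List.slice (PySem.Int.toChars e)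
        (some (PySem.Int.truncdiv (((PySem.Int.toChars e).length : Int)) 2)) none)
    ↔ ∃ k, Pk k e := by
  have hpk_pos : ∀ k, Pk k e → 1 ≤ e := by
    rintro k ⟨hk, s, hs1, hs2, rfl⟩
    have p1 : (1:Int) ≤ 10 ^ (k-1) := one_le_pow₀ (by norm_num)
    have p2 : (1:Int) ≤ 10 ^ k := one_le_pow₀ (by norm_num)
    nlinarith
  by_cases he : 0 ≤ e
  · -- nonnegative e
    rw [toChars_nonneg e he]
    set n := e.toNat with hn
    rcases Nat.eq_zero_or_pos n with h0 | h1
    · rw [h0]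
      constructor
      · intro h; exfalso; revert h; rw [dstr]; decide
      · rintro ⟨k, hpk⟩
        have := hpk_pos k hpk
        omega
    · -- n ≥ 1
      set j := Nat.log 10 n with hj
      have hj1 : 10 ^ j ≤ n := Nat.pow_log_le_self 10 (by omega)
      have hj2 : n < 10 ^ (j+1) := Nat.lt_pow_succ_log_self (by omega) n
      have hlen : (dstr n).length = j + 1 := dstr_len j n hj1 hj2
      rw [trunc2, PySem.List.slice_to_natCast, PySem.List.slice_from_natCast, hlen]
      have hcast : (↑n : Int) = e := Int.toNat_of_nonneg he
      rcases Nat.even_or_odd j with ⟨t, ht⟩ | ⟨t, ht⟩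
      · -- j even: length j+1 odd, halves have different lengths; and no Pk k e
        constructor
        · intro h
          have := congrArg List.length h
          simp [hlen] at this
          omega
        · rintro ⟨k, hk1, s, hs1, hs2, hse⟩
          have hs0 : (0:Int) < s := lt_of_lt_of_le (by positivity) hs1
          set st := s.toNat with hst
          have hsc : (st : Int) = s := Int.toNat_of_nonneg (le_of_lt hs0)
          have h1' : 10 ^ (k-1) ≤ st := by
            have := hs1; rw [← hsc] at this; exact_mod_cast this
          have h2' : st ≤ 10 ^ k - 1 := by
            have p2 : (1:Int) ≤ 10 ^ k := one_le_pow₀ (by norm_num)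
            have := hs2; rw [← hsc] at this
            have : (st : Int) ≤ 10 ^ k - 1 := this
            obtain ⟨_, h, _⟩ := toNat_bounds hs1 hs2
            exact h
          have hne : n = st * (10 ^ k + 1) := by
            have : (n : Int) = (st : Int) * ((10:Int) ^ k + 1) := by rw [hcast, hse, hsc]
            exact_mod_cast this
          have := len_of_double k st hk1 h1' h2'
          rw [← hne] at this
          omega
      · -- j odd, j = 2*t + 1; write k for the half length
        set k := t + 1 with hkdef
        have hk1 : 1 ≤ k := by omega
        have hhalf : (j+1)/2 = k := by omega
        rw [hhalf]
        have hpos : 0 < 10 ^ k := Nat.pow_pos (by omega)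
        have e1 : 10 ^ (k-1) * 10 ^ k = 10 ^ (2*k - 1) := by rw [← pow_add]; congr 1; omega
        have e2 : 10 ^ k * 10 ^ k = 10 ^ (2*k) := by rw [← pow_add]; congr 1; omega
        have hb1 : 10 ^ (2*k - 1) ≤ n := by
          have : 2*k - 1 = j := by omega
          rw [this]; exact hj1
        have hb2 : n < 10 ^ (2*k) := by
          have : 2*k = j + 1 := by omega
          rw [this]; exact hj2
        set q := n / 10 ^ k with hqdef
        set r := n % 10 ^ k with hrdef
        have hq1 : 10 ^ (k-1) ≤ q := by
          rw [hqdef, Nat.le_div_iff_mul_le hpos, e1]; exact hb1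
        have hq2 : q < 10 ^ k := by
          rw [hqdef, Nat.div_lt_iff_lt_mul hpos, e2]; exact hb2
        have hr : r < 10 ^ k := Nat.mod_lt _ hpos
        have hq0 : 1 ≤ q := le_trans (Nat.one_le_pow _ _ (by omega)) hq1
        have hdec : dstr n = dstr q ++ pad k r := by
          conv_lhs => rw [← Nat.div_add_mod n (10 ^ k), Nat.mul_comm]
          exact dstr_decomp k q r hq0 hr
        have hlq : (dstr q).length = k := by
          have hke : k - 1 + 1 = k := by omega
          have := dstr_len (k-1) q hq1 (by rw [hke]; exact hq2)
          rw [hke] at this; exact this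
        rw [hdec, ← hlq, List.take_left, List.drop_left, hlq]
        constructor
        · intro hqr
          rw [dstr_eq_pad k q hk1 hq1 hq2] at hqr
          have hqreq : q = r := pad_inj hq2 hr hqr
          refine ⟨k, hk1, (q : Int), by exact_mod_cast hq1, ?_, ?_⟩
          · have : (q:Int) < (10:Int) ^ k := by exact_mod_cast hq2
            omega
          · have hnq : n = q * (10 ^ k + 1) := by
              conv_lhs => rw [← Nat.div_add_mod n (10 ^ k)]
              rw [← hqdef, ← hrdef, ← hqreq]; ring
            rw [← hcast, hnq]; push_cast; ring
        · rintro ⟨k', hk', s, hs1, hs2, hse⟩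
          obtain ⟨h1', h2', hsc⟩ := toNat_bounds hs1 hs2
          set st := s.toNat with hst
          have hne : n = st * (10 ^ k' + 1) := by
            have : (n : Int) = (st : Int) * ((10:Int) ^ k' + 1) := by rw [hcast, hse, hsc]
            exact_mod_cast this
          have hlen2 := len_of_double k' st hk' h1' h2'
          rw [← hne] at hlen2
          have hkk : k' = k := by omega
          subst hkk
          have hnform : n = st + 10 ^ k * st := by rw [hne]; ring
          have hqs : q = st := by
            rw [hqdef, hnform, Nat.add_mul_div_left _ _ hpos, Nat.div_eq_of_lt (by omega)]
            omega
          have hrs : r = st := by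
            rw [hrdef, hnform, Nat.add_mul_mod_self_left, Nat.mod_eq_of_lt (by omega)]
          rw [hqs, hrs]
          exact dstr_eq_pad k st hk1 h1' (by omega)
  · -- negative e: toChars begins with '-', halves can never match; and no Pk
    constructor
    · intro h
      exfalso
      rw [PySem.Int.toChars, if_pos (by omega)] at h
      rw [Nat.toDigits, toDigitsCore_eq_dstr _ _ _ (by omega), List.append_nil] at h
      set l := dstr e.natAbs with hl
      set L := ('-' :: l).length with hL
      rw [trunc2, PySem.List.slice_to_natCast, PySem.List.slice_from_natCast] at h
      have hlp : 1 ≤ l.length := dstr_length_pos _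
      have hlen := congrArg List.length h
      simp at hlen
      -- lengths: min (L/2) L = L - L/2 forces L even, L/2 ≥ 1
      have hLl : L = l.length + 1 := by rw [hL]; simp
      have hh1 : 1 ≤ L / 2 := by omega
      rcases Nat.exists_eq_add_of_le hh1 with ⟨u, hu⟩
      have hu' : L / 2 = u + 1 := by omega
      have ht : List.take (L/2) ('-' :: l) = '-' :: List.take (L/2 - 1) l := by
        rw [hu', List.take_succ_cons, Nat.add_sub_cancel]
      have hd : List.drop (L/2) ('-' :: l) = List.drop (L/2 - 1) l := by
        rw [hu', List.drop_succ_cons, Nat.add_sub_cancel]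
      rw [ht, hd] at h
      have : '-' ∈ List.drop (L/2 - 1) l := by rw [← h]; simp
      have hmem : '-' ∈ l := List.mem_of_mem_drop this
      obtain ⟨d, hd10, hdc⟩ := dstr_digits hmem
      revert hdc; interval_cases d <;> decide
    · rintro ⟨k, hpk⟩
      have := hpk_pos k hpk
      omega

-- ==== proof-side helpers ====

def contribD (start end_ : Int) (k : Nat) : Int :=
  let m : Int := 10 ^ k + 1
  let lo : Int := max ((10 : Int) ^ (k - 1)) (-(PySem.Int.floordiv (-start) m))
  let hi : Int := min ((10 : Int) ^ k - 1) (PySem.Int.floordiv end_ m)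
  if lo ≤ hi then PySem.Int.floordiv (m * (lo + hi) * (hi - lo + 1)) 2 else 0

theorem loop_unfold_pos {start end_ : Int} {k : Nat}
    (h : (10 : Int) ^ (k - 1) * (10 ^ k + 1) ≤ end_) :
    part1AltLoop start end_ k = contribD start end_ k + part1AltLoop start end_ (k + 1) := by
  rw [part1AltLoop, dif_pos h]; rfl

theorem loop_unfold_neg {start end_ : Int} {k : Nat}
    (h : ¬ (10 : Int) ^ (k - 1) * (10 ^ k + 1) ≤ end_) :
    part1AltLoop start end_ k = 0 := by
  rw [part1AltLoop, dif_neg h]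

theorem fdiv_brackets (a m : Int) (hm : 0 < m) :
    PySem.Int.floordiv a m * m ≤ a ∧ a < (PySem.Int.floordiv a m + 1) * m := by
  have h1 := PySem.Int.floordiv_mul_add_mod a m
  have h2 := PySem.Int.mod_nonneg a hm
  have h3 := PySem.Int.mod_lt a hm
  constructor <;> nlinarith

theorem ceil_brackets (a m : Int) (hm : 0 < m) :
    a ≤ (-(PySem.Int.floordiv (-a) m)) * m ∧ ((-(PySem.Int.floordiv (-a) m)) - 1) * m < a := by
  obtain ⟨h1, h2⟩ := fdiv_brackets (-a) m hm
  constructor <;> nlinarith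

theorem fdiv_two_mul (y : Int) : PySem.Int.floordiv (2 * y) 2 = y :=
  (PySem.Int.floordiv_eq_iff_of_pos (by omega)).mpr ⟨by omega, by omega⟩

theorem gauss_single (m s : Int) : PySem.Int.floordiv (m * (s + s) * (s - s + 1)) 2 = m * s := by
  have h : m * (s + s) * (s - s + 1) = 2 * (m * s) := by ring
  rw [h, fdiv_two_mul]

theorem gauss_step (m lo hi : Int) :
    PySem.Int.floordiv (m * (lo + hi) * (hi - lo + 1)) 2 =
      PySem.Int.floordiv (m * (lo + (hi - 1)) * ((hi - 1) - lo + 1)) 2 + m * hi := by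
  obtain ⟨y, hy⟩ : ∃ y, (lo + hi) * (hi - lo + 1) = 2 * y := by
    rcases Int.even_or_odd (lo + hi) with ⟨c, hc⟩ | ⟨c, hc⟩
    · exact ⟨c * (hi - lo + 1), by rw [show lo + hi = 2 * c by omega]; ring⟩
    · have hd : ∃ d, hi - lo + 1 = 2 * d := ⟨hi - c, by omega⟩
      obtain ⟨d, hd⟩ := hd
      exact ⟨(lo + hi) * d, by rw [hd]; ring⟩
  have h1 : m * (lo + hi) * (hi - lo + 1) = 2 * (m * y) := by rw [mul_assoc, hy]; ring
  have h2 : m * (lo + (hi - 1)) * ((hi - 1) - lo + 1) = 2 * (m * (y - hi)) := by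
    have : (lo + (hi - 1)) * ((hi - 1) - lo + 1) = (lo + hi) * (hi - lo + 1) - 2 * hi := by ring
    rw [mul_assoc, this, hy]; ring
  rw [h1, h2, fdiv_two_mul, fdiv_two_mul]; ring

theorem Pk_bounds {k : Nat} {e : Int} (h : Pk k e) :
    (10:Int) ^ (2*k - 1) ≤ e ∧ e < (10:Int) ^ (2*k) := by
  obtain ⟨hk, s, hs1, hs2, rfl⟩ := h
  have e1 : (10:Int) ^ (2*k - 1) = 10 ^ (k-1) * 10 ^ k := by rw [← pow_add]; congr 1; omega
  have e2 : (10:Int) ^ (2*k) = 10 ^ k * 10 ^ k := by rw [← pow_add]; congr 1; omega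
  have p1 : (1:Int) ≤ 10 ^ (k-1) := one_le_pow₀ (by norm_num)
  have p2 : (1:Int) ≤ 10 ^ k := one_le_pow₀ (by norm_num)
  have hmn : (0:Int) ≤ 10 ^ k + 1 := by positivity
  constructor
  · nlinarith [mul_le_mul_of_nonneg_right hs1 hmn]
  · nlinarith [mul_le_mul_of_nonneg_right hs2 hmn]

theorem Pk_unique {k k' : Nat} {e : Int} (h : Pk k e) (h' : Pk k' e) : k = k' := by
  have aux : ∀ {a b : Nat}, a < b → ¬ (Pk a e ∧ Pk b e) := by
    rintro a b hab ⟨ha, hb⟩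
    obtain ⟨_, ha2⟩ := Pk_bounds ha
    obtain ⟨hb1, _⟩ := Pk_bounds hb
    have hb0 : 1 ≤ b := hb.1
    have : (10:Int) ^ (2*a) ≤ 10 ^ (2*b - 1) :=
      pow_le_pow_right₀ (by norm_num) (by omega)
    linarith
  rcases Nat.lt_trichotomy k k' with hlt | heq | hlt
  · exact absurd ⟨h, h'⟩ (aux hlt)
  · exact heq
  · exact absurd ⟨h', h⟩ (aux hlt)

theorem contrib_eq_of_not_Pk (start end_ : Int) (k : Nat) (hk : 1 ≤ k) (hnp : ¬ Pk k end_) :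
    contribD start end_ k = contribD start (end_ - 1) k := by
  simp only [contribD]
  have p1 : (1:Int) ≤ 10 ^ (k-1) := one_le_pow₀ (by norm_num)
  have hks : (10:Int) ^ k = 10 * 10 ^ (k-1) := by
    conv_lhs => rw [show k = (k-1)+1 by omega, pow_succ]
    ring
  have hm : (0:Int) < 10 ^ k + 1 := by positivity
  set m : Int := 10 ^ k + 1 with hmdef
  set c : Int := -(PySem.Int.floordiv (-start) m) with hcdef
  set f : Int := PySem.Int.floordiv end_ m with hfdef
  set f' : Int := PySem.Int.floordiv (end_ - 1) m with hf'def
  obtain ⟨hfb1, hfb2⟩ := fdiv_brackets end_ m hm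
  rw [← hfdef] at hfb1 hfb2
  by_cases hdvd : PySem.Int.mod end_ m = 0
  · have hfm : f * m = end_ := by
      have h0 := PySem.Int.floordiv_mul_add_mod end_ m
      rw [← hfdef, hdvd] at h0
      linarith
    have hf' : f' = f - 1 := by
      rw [hf'def]
      exact (PySem.Int.floordiv_eq_iff_of_pos hm).mpr ⟨by nlinarith, by nlinarith⟩
    have hnot : ¬((10:Int) ^ (k-1) ≤ f ∧ f ≤ 10 ^ k - 1) := by
      rintro ⟨ha, hb⟩
      exact hnp ⟨hk, f, ha, hb, by rw [← hfm, hmdef]⟩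
    rw [hf']
    rcases not_and_or.mp hnot with hlow | hhigh
    · -- f < 10^(k-1): both windows below lo, both contributions 0
      push_neg at hlow
      have h1 : min ((10:Int) ^ k - 1) f = f := min_eq_right (by linarith)
      have h2 : min ((10:Int) ^ k - 1) (f - 1) = f - 1 := min_eq_right (by linarith)
      rw [h1, h2, if_neg (by intro hc; have := le_max_left ((10:Int) ^ (k-1)) c; linarith),
        if_neg (by intro hc; have := le_max_left ((10:Int) ^ (k-1)) c; linarith)]
    · -- f > 10^k - 1: both windows clamp to hiS, identical
      push_neg at hhigh
      rw [min_eq_left (by linarith), min_eq_left (by linarith)]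
  · have hmodpos : 1 ≤ PySem.Int.mod end_ m := by
      have := PySem.Int.mod_nonneg end_ hm
      omega
    have hmodlt := PySem.Int.mod_lt end_ hm
    have h0 := PySem.Int.floordiv_mul_add_mod end_ m
    rw [← hfdef] at h0
    have hf' : f' = f := by
      rw [hf'def]
      exact (PySem.Int.floordiv_eq_iff_of_pos hm).mpr ⟨by linarith, by nlinarith⟩
    rw [hf']

theorem loop_zero (start end_ : Int) (k : Nat) (h : end_ < start) :
    part1AltLoop start end_ k = 0 := by
  by_cases hg : (10 : Int) ^ (k - 1) * (10 ^ k + 1) ≤ end_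
  · rw [loop_unfold_pos hg, loop_zero start end_ (k + 1) h]
    simp only [contribD]
    have hm : (0:Int) < 10 ^ k + 1 := by positivity
    rw [if_neg]
    · ring
    · intro hc
      obtain ⟨hcl, _⟩ := ceil_brackets start (10 ^ k + 1) hm
      obtain ⟨hfl, _⟩ := fdiv_brackets end_ (10 ^ k + 1) hm
      have h1 : -(PySem.Int.floordiv (-start) (10 ^ k + 1)) ≤ PySem.Int.floordiv end_ (10 ^ k + 1) :=
        le_trans (le_trans (le_max_right _ _) hc) (min_le_right _ _)
      nlinarith
  · rw [loop_unfold_neg hg]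
termination_by (end_ + 1 - 10 ^ (k - 1 : Nat) + if k = 0 then 1 else 0 : Int).toNat
decreasing_by
  have h1 : (1 : Int) ≤ 10 ^ (k - 1) := one_le_pow₀ (by norm_num)
  have h2 : (1 : Int) ≤ 10 ^ k := one_le_pow₀ (by norm_num)
  have h3 : (10 : Int) ^ (k - 1) ≤ end_ := by nlinarith
  simp only [Nat.add_sub_cancel]
  by_cases hk : k = 0
  · subst hk; norm_num at h3 ⊢; omega
  · have h5 : (10 : Int) ^ (k - 1) < 10 ^ k :=
      pow_lt_pow_right₀ (by norm_num) (by omega)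
    simp only [if_neg hk]
    norm_num
    omega

theorem loop_step_none (start end_ : Int) (k : Nat) (hk : 1 ≤ k)
    (h : ∀ k', k ≤ k' → ¬ Pk k' end_) :
    part1AltLoop start end_ k = part1AltLoop start (end_ - 1) k := by
  have p1 : (1:Int) ≤ 10 ^ (k-1) := one_le_pow₀ (by norm_num)
  have hks : (10:Int) ^ k = 10 * 10 ^ (k-1) := by
    conv_lhs => rw [show k = (k-1)+1 by omega, pow_succ]
    ring
  by_cases hg : (10 : Int) ^ (k - 1) * (10 ^ k + 1) ≤ end_
  · have hne : end_ ≠ 10 ^ (k-1) * (10 ^ k + 1) := by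
      intro hEq
      exact h k le_rfl ⟨hk, 10 ^ (k-1), le_rfl, by linarith, by rw [hEq]⟩
    have hg' : (10 : Int) ^ (k - 1) * (10 ^ k + 1) ≤ end_ - 1 := by
      rcases lt_or_eq_of_le hg with hlt | hEq
      · omega
      · exact absurd hEq.symm hne
    rw [loop_unfold_pos hg, loop_unfold_pos hg',
      contrib_eq_of_not_Pk start end_ k hk (h k le_rfl),
      loop_step_none start end_ (k + 1) (by omega) (fun k' hk' => h k' (by omega))]
  · have hg' : ¬ (10 : Int) ^ (k - 1) * (10 ^ k + 1) ≤ end_ - 1 := by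
      intro hc; exact hg (by linarith)
    rw [loop_unfold_neg hg, loop_unfold_neg hg']
termination_by (end_ + 1 - 10 ^ (k - 1 : Nat) + if k = 0 then 1 else 0 : Int).toNat
decreasing_by
  have h1 : (1 : Int) ≤ 10 ^ (k - 1) := one_le_pow₀ (by norm_num)
  have h2 : (1 : Int) ≤ 10 ^ k := one_le_pow₀ (by norm_num)
  have h3 : (10 : Int) ^ (k - 1) ≤ end_ := by nlinarith
  simp only [Nat.add_sub_cancel]
  by_cases hk0 : k = 0
  · subst hk0; norm_num at h3 ⊢; omega
  · have h5 : (10 : Int) ^ (k - 1) < 10 ^ k :=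
      pow_lt_pow_right₀ (by norm_num) (by omega)
    simp only [if_neg hk0]
    norm_num
    omega

theorem loop_step_hit (start end_ : Int) (k k' : Nat) (hk : 1 ≤ k) (hkk : k ≤ k')
    (hp : Pk k' end_) (hse : start ≤ end_) :
    part1AltLoop start end_ k = part1AltLoop start (end_ - 1) k + end_ := by
  have p1 : (1:Int) ≤ 10 ^ (k-1) := one_le_pow₀ (by norm_num)
  have hks : (10:Int) ^ k = 10 * 10 ^ (k-1) := by
    conv_lhs => rw [show k = (k-1)+1 by omega, pow_succ]
    ring
  have hm : (0:Int) < 10 ^ k + 1 := by positivity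
  by_cases heq : k = k'
  · subst heq
    obtain ⟨_, s, hs1, hs2, hE⟩ := hp
    have hguard : (10:Int) ^ (k-1) * (10 ^ k + 1) ≤ end_ := by nlinarith
    have hfs : PySem.Int.floordiv end_ (10 ^ k + 1) = s :=
      (PySem.Int.floordiv_eq_iff_of_pos hm).mpr ⟨by nlinarith, by nlinarith⟩
    have hcle : -(PySem.Int.floordiv (-start) (10 ^ k + 1)) ≤ s := by
      obtain ⟨_, hc2⟩ := ceil_brackets start (10 ^ k + 1) hm
      nlinarith
    by_cases hsl : s = 10 ^ (k-1)
    · -- lowest double with k-digit halves: previous loop breaks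
      subst hsl
      have hgprev : ¬ (10:Int) ^ (k-1) * (10 ^ k + 1) ≤ end_ - 1 := by
        rw [hE]; intro hc; nlinarith
      have hgnext : ¬ (10:Int) ^ (k+1-1) * (10 ^ (k+1) + 1) ≤ end_ := by
        simp only [Nat.add_sub_cancel]
        rw [hE, hks, pow_succ, hks]
        intro hc; nlinarith
      rw [loop_unfold_pos hguard, loop_unfold_neg hgprev, loop_unfold_neg hgnext]
      simp only [contribD]
      rw [hfs, min_eq_right (by linarith), max_eq_left hcle, if_pos le_rfl, gauss_single]
      linarith
    · -- s > 10^(k-1): both loops recurse; contribution grows by end_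
      have hsgt : 10 ^ (k-1) < s := lt_of_le_of_ne hs1 (Ne.symm hsl)
      have hgprev : (10:Int) ^ (k-1) * (10 ^ k + 1) ≤ end_ - 1 := by
        rw [hE]; nlinarith
      have hnonek : ∀ k'', k + 1 ≤ k'' → ¬ Pk k'' end_ := by
        intro k'' hk'' hP
        have := Pk_unique hP ⟨hk, s, hs1, hs2, hE⟩
        omega
      rw [loop_unfold_pos hguard, loop_unfold_pos hgprev,
        loop_step_none start end_ (k + 1) (by omega) hnonek]
      have hfs' : PySem.Int.floordiv (end_ - 1) (10 ^ k + 1) = s - 1 :=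
        (PySem.Int.floordiv_eq_iff_of_pos hm).mpr ⟨by nlinarith, by nlinarith⟩
      simp only [contribD]
      rw [hfs, hfs', min_eq_right (by linarith), min_eq_right (by linarith)]
      set lo : Int := max ((10:Int) ^ (k-1)) (-(PySem.Int.floordiv (-start) (10 ^ k + 1))) with hlodef
      have hlole : lo ≤ s := max_le (le_of_lt hsgt) hcle
      rw [if_pos hlole]
      by_cases hlos : lo ≤ s - 1
      · rw [if_pos hlos, gauss_step ((10:Int) ^ k + 1) lo s]
        have : ((10:Int) ^ k + 1) * s = end_ := by rw [hE]; ring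
        linarith
      · have hloeq : lo = s := by omega
        rw [if_neg hlos, hloeq, gauss_single]
        have : ((10:Int) ^ k + 1) * s = end_ := by rw [hE]; ring
        linarith
  · -- k < k': this level's contribution is unchanged; recurse
    have hklt : k < k' := lt_of_le_of_ne hkk heq
    have hk'1 : 1 ≤ k' := hp.1
    obtain ⟨hb1, _⟩ := Pk_bounds hp
    have q1 : (10:Int) ^ (k-1) * 10 ^ k = 10 ^ (2*k - 1) := by rw [← pow_add]; congr 1; omega
    have q2 : (10:Int) ^ (2*k) = 10 * 10 ^ (2*k - 1) := by
      conv_lhs => rw [show 2*k = (2*k-1)+1 by omega, pow_succ]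
      ring
    have q3 : (10:Int) ^ (k-1) ≤ 10 ^ (2*k - 1) := pow_le_pow_right₀ (by norm_num) (by omega)
    have q4 : (10:Int) ^ (2*k) ≤ 10 ^ (2*k' - 1) := pow_le_pow_right₀ (by norm_num) (by omega)
    have q5 : (1:Int) ≤ 10 ^ (2*k - 1) := one_le_pow₀ (by norm_num)
    have hgex : (10:Int) ^ (k-1) * (10 ^ k + 1) = 10 ^ (2*k - 1) + 10 ^ (k-1) := by
      rw [mul_add, q1, mul_one]
    have hg' : (10:Int) ^ (k-1) * (10 ^ k + 1) ≤ end_ - 1 := by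
      rw [hgex]; linarith
    have hg : (10:Int) ^ (k-1) * (10 ^ k + 1) ≤ end_ := by linarith
    have hnpk : ¬ Pk k end_ := fun hP => absurd (Pk_unique hP hp) (by omega)
    rw [loop_unfold_pos hg, loop_unfold_pos hg',
      contrib_eq_of_not_Pk start end_ k hk hnpk,
      loop_step_hit start end_ (k + 1) k' (by omega) (by omega) hp hse]
    ring
termination_by (end_ + 1 - 10 ^ (k - 1 : Nat) + if k = 0 then 1 else 0 : Int).toNat
decreasing_by
  have h1 : (1 : Int) ≤ 10 ^ (k - 1) := one_le_pow₀ (by norm_num)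
  have h2 : (1 : Int) ≤ 10 ^ k := one_le_pow₀ (by norm_num)
  have h3 : (10 : Int) ^ (k - 1) ≤ end_ := by nlinarith
  simp only [Nat.add_sub_cancel]
  by_cases hk0 : k = 0
  · subst hk0; norm_num at h3 ⊢; omega
  · have h5 : (10 : Int) ^ (k - 1) < 10 ^ k :=
      pow_lt_pow_right₀ (by norm_num) (by omega)
    simp only [if_neg hk0]
    norm_num
    omega

theorem part1_loop_eq (start end_ : Int) : part1 start end_ = part1AltLoop start end_ 1 := by
  by_cases h : end_ < start
  · have hr : PySem.List.pyRange start (end_ + 1) = [] := by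
      simp [PySem.List.pyRange]
      omega
    rw [loop_zero start end_ 1 h]
    unfold part1
    rw [hr]
    rfl
  · rw [not_lt] at h
    have hstep : PySem.List.pyRange start (end_ + 1) = PySem.List.pyRange start end_ ++ [end_] :=
      PySem.List.pyRange_one_succ_right h
    have IH := part1_loop_eq start (end_ - 1)
    unfold part1 at IH ⊢
    rw [show end_ - 1 + 1 = end_ by ring] at IH
    rw [hstep, List.foldl_append, List.foldl_cons, List.foldl_nil, IH]
    by_cases hv : PySem.List.slice (PySem.Int.toChars end_) none
        (some (PySem.Int.truncdiv (((PySem.Int.toChars end_).length : Int)) 2)) =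
      PySem.List.slice (PySem.Int.toChars end_)
        (some (PySem.Int.truncdiv (((PySem.Int.toChars end_).length : Int)) 2)) none
    · obtain ⟨k', hpk⟩ := (valid_iff end_).mp hv
      rw [loop_step_hit start end_ 1 k' le_rfl hpk.1 hpk h]
      simp only [if_pos hv]
    · have hnone : ∀ k', 1 ≤ k' → ¬ Pk k' end_ := fun k' _ hp => hv ((valid_iff end_).mpr ⟨k', hp⟩)
      rw [loop_step_none start end_ 1 le_rfl hnone]
      simp only [if_neg hv]
termination_by (end_ + 1 - start).toNat
decreasing_by omega

-- ===== VERDICT (by name: the statement is the Claim_ definition above) =====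
theorem part1_spec : Claim_equal_part1 := by
  intro start end_ _
  unfold Spec_part1 part1_alt
  exact part1_loop_eq start end_
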